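-- pv_equiv track=rewrite | github.com/pradigmaz/md2docx | python/md2docx/markdown_parser.py | _fix_broken_table_lines
-- ===== SOURCE A (Python) =====
-- def _fix_broken_table_lines(text: str) -> str:
--     """Fix table lines that were broken by text wrapping.
--
--     Some editors wrap long lines, breaking markdown tables.
--     This joins lines that appear to be continuations of table rows.
--     """
--     lines = text.split('\n')
--     fixed_lines = []
--     i = 0
--
--     while i < len(lines):
--         line = lines[i]
--
--         # Check if this looks like a table row (starts with |)
--         if line.strip().startswith('|'):
--             # A complete table row should end with |
--             # Keep joining lines until we get a complete row
--             while not line.rstrip().endswith('|') and i + 1 < len(lines):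
--                 next_line = lines[i + 1]
--                 # If next line starts with |, it's a new row, stop joining
--                 if next_line.strip().startswith('|'):
--                     break
--                 # If next line is empty, stop joining
--                 if not next_line.strip():
--                     break
--                 # Join the continuation
--                 line = line.rstrip() + next_line.lstrip()
--                 i += 1
--
--         fixed_lines.append(line)
--         i += 1
--
--     return '\n'.join(fixed_lines)
-- ===== SOURCE B (Python) =====
-- def _fix_broken_table_lines(text: str) -> str:
--     """Fix table lines that were broken by text wrapping.
--
--     Single forward pass: a boolean flag records whether the last emitted
--     line is an incomplete table row still waiting for its closing '|'.
--     """
--     fixed_lines = []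
--     open_row = False
--     for line in text.split('\n'):
--         if open_row and line.strip() and not line.strip().startswith('|'):
--             merged = fixed_lines[-1].rstrip() + line.lstrip()
--             fixed_lines[-1] = merged
--             open_row = not merged.rstrip().endswith('|')
--         else:
--             fixed_lines.append(line)
--             open_row = line.strip().startswith('|') and not line.rstrip().endswith('|')
--     return '\n'.join(fixed_lines)
-- ===== Notes on version B (the rewrite author's own statement) =====
-- stated objective: simpler
-- what changed: Replaces A's manual line-index with nested while loops (inner loop advancing the shared index past joined continuations) by a single forward for-loop that keeps an open-row flag and merges continuations into the last emitted line.
import Mathlib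
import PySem

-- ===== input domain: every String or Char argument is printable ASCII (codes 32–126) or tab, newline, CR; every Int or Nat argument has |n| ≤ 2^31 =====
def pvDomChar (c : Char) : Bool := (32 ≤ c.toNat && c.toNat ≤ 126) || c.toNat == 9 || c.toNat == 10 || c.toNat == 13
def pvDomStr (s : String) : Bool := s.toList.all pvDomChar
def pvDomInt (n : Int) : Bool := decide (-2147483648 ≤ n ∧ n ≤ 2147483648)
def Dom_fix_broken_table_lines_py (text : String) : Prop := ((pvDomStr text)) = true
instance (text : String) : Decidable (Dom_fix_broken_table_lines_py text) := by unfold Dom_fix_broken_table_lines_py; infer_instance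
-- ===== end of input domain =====

-- B replaces A's index-driven outer/inner while loops by one forward pass with an
-- "open incomplete row" flag (objective: simpler, same complexity).

-- shared helpers: the Python subexpressions both versions use verbatim
-- line.strip().startswith('|')
def pvStartsBar (s : String) : Bool := PySem.Str.startswith (PySem.Str.strip s) "|"
-- line.rstrip().endswith('|')
def pvEndsBar (s : String) : Bool := PySem.Str.endswith (PySem.Str.rstrip s) "|"
-- not line.strip()
def pvBlank (s : String) : Bool := PySem.Str.strip s == ""

-- (split? returns some for the non-empty separator "\n"; getD [] never fires)
-- ===== PORT A =====
-- A's inner while loop: guard 'not line.rstrip().endswith("|") and i+1 < len(lines)',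
-- breaks on a new '|' row or a blank next line, otherwise joins and advances i.
def pvInnerA (line : String) : List String → String × List String
  | [] => (line, [])
  | next :: rs =>
    if pvEndsBar line then (line, next :: rs)
    else if pvStartsBar next then (line, next :: rs)
    else if pvBlank next then (line, next :: rs)
    else pvInnerA (PySem.Str.rstrip line ++ PySem.Str.lstrip next) rs

theorem pvInnerA_snd_le (rest : List String) : ∀ line, (pvInnerA line rest).2.length ≤ rest.length := by
  induction rest with
  | nil => intro line; simp [pvInnerA]
  | cons next rs ih =>
    intro line
    simp only [pvInnerA]
    split
    · simp
    · split
      · simp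
      · split
        · simp
        · exact le_trans (ih _) (by simp)

-- A's outer while loop over the line index
def pvGoA : List String → List String
  | [] => []
  | line :: rest =>
    if pvStartsBar line then
      (pvInnerA line rest).1 :: pvGoA (pvInnerA line rest).2
    else
      line :: pvGoA rest
termination_by l => l.length
decreasing_by
  · exact Nat.lt_succ_of_le (pvInnerA_snd_le rest line)
  · simp

def fix_broken_table_lines_py (text : String) : String :=
  PySem.Str.join "\n" (pvGoA (((PySem.Str.split? text "\n").getD [])))

-- ===== PORT B =====
-- one step of B's for loop: state = (fixed_lines, open_row); fixed_lines[-1] is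
-- read with getLast?.getD "" (open_row is never true while fixed_lines is empty)
def pvStepB (st : List String × Bool) (line : String) : List String × Bool :=
  if st.2 && !pvBlank line && !pvStartsBar line then
    let merged := PySem.Str.rstrip ((st.1.getLast?).getD "") ++ PySem.Str.lstrip line
    (st.1.dropLast ++ [merged], !pvEndsBar merged)
  else
    (st.1 ++ [line], pvStartsBar line && !pvEndsBar line)

def fix_broken_table_lines_py_alt (text : String) : String :=
  PySem.Str.join "\n" (((((PySem.Str.split? text "\n").getD [])).foldl pvStepB ([], false)).1)

-- ===== PRECONDITION & SPEC =====
def Spec_fix_broken_table_lines_py (text : String) (out : String) : Prop := out = fix_broken_table_lines_py_alt text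
instance (text : String) (out : String) : Decidable (Spec_fix_broken_table_lines_py text out) := by unfold Spec_fix_broken_table_lines_py; infer_instance

-- ===== CLAIM (what is proved, stated in full; the proofs are below) =====
def Claim_equal_fix_broken_table_lines_py : Prop := ∀ (text : String), Dom_fix_broken_table_lines_py text → Spec_fix_broken_table_lines_py text (fix_broken_table_lines_py text)

-- ===== LEMMAS AND PROOFS =====

theorem pvInnerA_of_endsBar (line : String) (rest : List String) (h : pvEndsBar line = true) :
    pvInnerA line rest = (line, rest) := by
  cases rest <;> simp [pvInnerA, h]

-- B's flag is true exactly while A's inner loop is still joining: from state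
-- (out ++ [line], true) with line not yet complete, the fold first performs the
-- joins of A's inner loop and then continues as from a closed state.
theorem pvAux2 (n : Nat)
    (ih : ∀ lines : List String, lines.length ≤ n → ∀ out,
      (List.foldl pvStepB (out, false) lines).1 = out ++ pvGoA lines) :
    ∀ rest : List String, rest.length ≤ n → ∀ line out, pvEndsBar line = false →
      (List.foldl pvStepB (out ++ [line], true) rest).1
        = out ++ (pvInnerA line rest).1 :: pvGoA (pvInnerA line rest).2 := by
  intro rest
  induction rest with
  | nil => intro _ line out _; simp [pvInnerA, pvGoA]
  | cons next rs ihr =>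
    intro hlen line out he
    by_cases hsn : pvStartsBar next = true
    · have hstop : pvInnerA line (next :: rs) = (line, next :: rs) := by
        simp [pvInnerA, he, hsn]
      rw [hstop]
      have hstep : List.foldl pvStepB (out ++ [line], true) (next :: rs)
          = List.foldl pvStepB (out ++ [line], false) (next :: rs) := by
        simp [List.foldl, pvStepB, hsn]
      rw [hstep, ih (next :: rs) hlen (out ++ [line])]
      simp
    · by_cases hbn : pvBlank next = true
      · have hstop : pvInnerA line (next :: rs) = (line, next :: rs) := by
          simp [pvInnerA, he, hsn, hbn]
        rw [hstop]
        have hstep : List.foldl pvStepB (out ++ [line], true) (next :: rs)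
            = List.foldl pvStepB (out ++ [line], false) (next :: rs) := by
          simp [List.foldl, pvStepB, hbn]
        rw [hstep, ih (next :: rs) hlen (out ++ [line])]
        simp
      · -- join step
        have hmerge : pvInnerA line (next :: rs)
            = pvInnerA (PySem.Str.rstrip line ++ PySem.Str.lstrip next) rs := by
          simp [pvInnerA, he, hsn, hbn]
        have hstep : pvStepB (out ++ [line], true) next
            = (out ++ [PySem.Str.rstrip line ++ PySem.Str.lstrip next],
               !pvEndsBar (PySem.Str.rstrip line ++ PySem.Str.lstrip next)) := by
          simp [pvStepB, hsn, hbn]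
        have hrs : rs.length ≤ n := le_trans (by simp) hlen
        rw [hmerge]
        set merged := PySem.Str.rstrip line ++ PySem.Str.lstrip next with hm
        by_cases hem : pvEndsBar merged = true
        · rw [pvInnerA_of_endsBar merged rs hem]
          simp only [List.foldl, hstep, hem]
          have := ih rs hrs (out ++ [merged])
          simpa using this
        · simp only [List.foldl, hstep, Bool.not_eq_true] at *
          rw [hem]
          exact ihr hrs merged out (by simpa using hem)

theorem pvMain (n : Nat) : ∀ lines : List String, lines.length ≤ n → ∀ out,
    (List.foldl pvStepB (out, false) lines).1 = out ++ pvGoA lines := by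
  induction n with
  | zero =>
    intro lines h out
    have : lines = [] := List.length_eq_zero_iff.mp (Nat.le_zero.mp h)
    subst this; simp [pvGoA]
  | succ n ih =>
    intro lines h out
    match lines with
    | [] => simp [pvGoA]
    | line :: rest =>
      have hrest : rest.length ≤ n := by simpa using h
      have hstep : pvStepB (out, false) line
          = (out ++ [line], pvStartsBar line && !pvEndsBar line) := by
        simp [pvStepB]
      by_cases hs : pvStartsBar line = true
      · by_cases he : pvEndsBar line = true
        · -- complete row: flag stays false
          rw [show pvGoA (line :: rest)
                = (pvInnerA line rest).1 :: pvGoA (pvInnerA line rest).2 by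
              simp [pvGoA, hs], pvInnerA_of_endsBar line rest he]
          simp only [List.foldl, hstep, hs, he]
          have := ih rest hrest (out ++ [line])
          simpa using this
        · -- incomplete row: flag opens, hand over to pvAux2
          rw [show pvGoA (line :: rest)
                = (pvInnerA line rest).1 :: pvGoA (pvInnerA line rest).2 by
              simp [pvGoA, hs]]
          simp only [List.foldl, hstep, hs, he]
          exact pvAux2 n ih rest hrest line out (by simpa using he)
      · -- not a table row: flag stays false
        rw [show pvGoA (line :: rest) = line :: pvGoA rest by simp [pvGoA, hs]]
        simp only [List.foldl, hstep, hs]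
        have := ih rest hrest (out ++ [line])
        simpa using this

-- ===== VERDICT (by name: the statement is the Claim_ definition above) =====
theorem fix_broken_table_lines_py_spec : Claim_equal_fix_broken_table_lines_py := by
  intro text _
  unfold Spec_fix_broken_table_lines_py fix_broken_table_lines_py fix_broken_table_lines_py_alt
  rw [pvMain (((PySem.Str.split? text "\n").getD [])).length _ le_rfl []]
  simp
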